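-- pv_equiv track=rewrite | github.com/langflow-ai/langflow | src/backend/base/langflow/components/agents/builder/requirements_gatherer.py | _categorize_questions
-- ===== SOURCE A (Python) =====
-- from typing import Any, Dict, List, Optional
--
-- def _categorize_questions(questions: List[Dict[str, Any]]) -> Dict[str, List[str]]:
--     """Categorize questions by type"""
--
--     categories = {}
--     for question in questions:
--         category = question.get("category", "general")
--         if category not in categories:
--             categories[category] = []
--         categories[category].append(question["question"])
--
--     return categories
-- ===== SOURCE B (Python) =====
-- def _categorize_questions(questions):
--     """Categorize questions by type"""
--     order = list(dict.fromkeys(q.get("category", "general") for q in questions))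
--     return {
--         cat: [q["question"] for q in questions if q.get("category", "general") == cat]
--         for cat in order
--     }
-- ===== Notes on version B (the rewrite author's own statement) =====
-- stated objective: alternative
-- what changed: Replaces the single-pass bucket accumulation with a two-phase build: first dedup the categories in first-seen order, then a dict comprehension that rescans the list once per category with a filtered list comprehension.
import Mathlib
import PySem

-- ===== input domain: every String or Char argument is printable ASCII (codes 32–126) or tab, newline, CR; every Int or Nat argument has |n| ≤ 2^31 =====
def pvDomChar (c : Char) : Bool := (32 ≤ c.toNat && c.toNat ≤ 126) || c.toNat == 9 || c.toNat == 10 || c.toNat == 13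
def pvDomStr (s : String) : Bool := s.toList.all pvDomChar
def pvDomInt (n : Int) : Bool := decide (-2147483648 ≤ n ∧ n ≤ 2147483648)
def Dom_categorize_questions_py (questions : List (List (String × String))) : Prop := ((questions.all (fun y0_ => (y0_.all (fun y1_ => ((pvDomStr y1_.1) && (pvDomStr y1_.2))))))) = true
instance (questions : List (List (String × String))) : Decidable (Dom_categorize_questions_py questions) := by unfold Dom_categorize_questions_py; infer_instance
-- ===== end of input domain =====

-- B groups by a dedup-of-categories pass followed by one filtered scan per category, instead of A's
-- single-pass accumulation into buckets; same return value on Pre_ (alternative decomposition, not faster).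

-- first-match lookup in an association-list dict, with a default: q.get(k, dflt)
def pvQGet (q : List (String × String)) (k dflt : String) : String :=
  match q.find? (fun p => p.1 == k) with
  | some p => p.2
  | none => dflt

-- ===== PORT A =====
-- single pass: for each question, create the bucket if absent, then append question["question"].
-- (On Pre_ every question has a "question" key, so the "" default of pvQGet is never taken.)
def categorize_questions_py (questions : List (List (String × String))) : List (String × List String) :=
  (questions.foldl
    (fun (categories : PySem.Dict String (List String)) question =>
      let category := pvQGet question "category" "general"
      let categories :=
        if categories.contains category then categories
        else categories.insert category []
      categories.modify category [] (fun l => l ++ [pvQGet question "question" ""]))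
    PySem.Dict.empty).items

-- ===== PORT B =====
-- dedup the categories in first-seen order, then one filtered scan of the whole list per category.
def categorize_questions_py_alt (questions : List (List (String × String))) : List (String × List String) :=
  let order := PySem.List.dedup (questions.map (fun q => pvQGet q "category" "general"))
  order.map (fun cat =>
    (cat, (questions.filter (fun q => pvQGet q "category" "general" == cat)).map
            (fun q => pvQGet q "question" "")))

-- ===== PRECONDITION & SPEC =====
-- Pre_ excludes questions lacking a "question" key: there A (and B) raise KeyError.
def Pre_categorize_questions_py (questions : List (List (String × String))) : Prop :=
  (questions.all (fun q => q.any (fun p => p.1 == "question"))) = true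
instance (questions : List (List (String × String))) : Decidable (Pre_categorize_questions_py questions) := by unfold Pre_categorize_questions_py; infer_instance
def pvWitness_categorize_questions_py : (List (List (String × String))) :=
  [[("category", "a"), ("question", "q1")], [("question", "q2")]]

def Spec_categorize_questions_py (questions : List (List (String × String))) (out : List (String × List String)) : Prop := out = categorize_questions_py_alt questions
instance (questions : List (List (String × String))) (out : List (String × List String)) : Decidable (Spec_categorize_questions_py questions out) := by unfold Spec_categorize_questions_py; infer_instance

-- ===== CLAIM (what is proved, stated in full; the proofs are below) =====
def Claim_equal_categorize_questions_py : Prop := ∀ (questions : List (List (String × String))), Dom_categorize_questions_py questions → Pre_categorize_questions_py questions → Spec_categorize_questions_py questions (categorize_questions_py questions)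

-- ===== LEMMAS AND PROOFS =====

-- A's loop body equals a plain modify-append step (creating the bucket first changes nothing).
theorem pv_step_eq (d : PySem.Dict String (List String)) (k : String) (v : String) :
    (if d.contains k then d else d.insert k []).modify k [] (fun l => l ++ [v])
      = d.modify k [] (fun l => l ++ [v]) := by
  by_cases h : d.contains k = true
  · simp [h]
  · have h' : d.contains k = false := by simpa using h
    simp only [h, if_neg, Bool.false_eq_true, not_false_eq_true]
    simp [PySem.Dict.modify, PySem.Dict.insert_insert_self, PySem.Dict.getD_insert_self,
      PySem.Dict.getD_of_not_contains d [] h']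

-- ===== VERDICT (by name: the statement is the Claim_ definition above) =====
theorem categorize_questions_py_spec : Claim_equal_categorize_questions_py := by
  intro questions _ _
  unfold Spec_categorize_questions_py categorize_questions_py categorize_questions_py_alt
  have hstep :
      questions.foldl
        (fun (categories : PySem.Dict String (List String)) question =>
          let category := pvQGet question "category" "general"
          let categories :=
            if categories.contains category then categories
            else categories.insert category []
          categories.modify category [] (fun l => l ++ [pvQGet question "question" ""]))
        PySem.Dict.empty
      = (questions.map (fun q => (pvQGet q "category" "general", pvQGet q "question" ""))).foldl
          (fun (d : PySem.Dict String (List String)) p => d.modify p.1 [] (fun l => l ++ [p.2]))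
          PySem.Dict.empty := by
    rw [List.foldl_map]
    exact List.foldl_ext _ _ _ (fun d q _ => pv_step_eq d _ _)
  rw [hstep]
  set pairs := questions.map (fun q => (pvQGet q "category" "general", pvQGet q "question" "")) with hpairs
  set D := pairs.foldl
      (fun (d : PySem.Dict String (List String)) p => d.modify p.1 [] (fun l => l ++ [p.2]))
      PySem.Dict.empty with hD
  have hnodup : D.keys.Nodup := by
    rw [hD]
    exact PySem.Dict.nodup_keys_foldl_modify_key pairs (·.1) [] _ _ (by simp)
  have hkeys : D.keys = PySem.List.dedup (questions.map (fun q => pvQGet q "category" "general")) := by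
    rw [hD, PySem.Dict.keys_foldl_modify_key]
    simp only [hpairs, PySem.List.dedup_eq_ofList, PySem.Set.update, List.map_map,
      Function.comp_def, PySem.Dict.keys_empty]
    rfl
  have hget : ∀ c, D.getD c [] =
      (questions.filter (fun q => pvQGet q "category" "general" == c)).map
        (fun q => pvQGet q "question" "") := by
    intro c
    rw [hD, PySem.Dict.getD_foldl_modify_append]
    simp [hpairs, List.filter_map, Function.comp_def]
  rw [PySem.Dict.items_eq_map_keys D hnodup [], hkeys]
  simp only [List.map_inj_left]
  intro c _
  rw [hget c]
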